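-- pv_equiv track=rewrite | github.com/eternalgr3y/Symbolic | symbolic_agi/reasoning_orchestrator.py | _assign_to_agents
-- ===== SOURCE A (Python) =====
-- from typing import Dict, Any, List, Optional
--
-- def _assign_to_agents(sub_problems: List[Dict[str, Any]]) -> Dict[str, List[Dict[str, Any]]]:
--     """Assign sub-problems to appropriate agents"""
--     assignments = {}
--     for sub_problem in sub_problems:
--         agent_type = sub_problem.get("aspect")
--         if agent_type:
--             if agent_type not in assignments:
--                 assignments[agent_type] = []
--             assignments[agent_type].append(sub_problem)
--     return assignments
-- ===== SOURCE B (Python) =====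
-- def _assign_to_agents(sub_problems):
--     """Assign sub-problems to appropriate agents"""
--     keys = list(dict.fromkeys(
--         sp.get("aspect") for sp in sub_problems if sp.get("aspect")
--     ))
--     return {k: [sp for sp in sub_problems if sp.get("aspect") == k] for k in keys}
-- ===== Notes on version B (the rewrite author's own statement) =====
-- stated objective: alternative
-- what changed: A builds the result in one pass, bucketing each sub-problem into a dict it mutates as it goes; B first dedups the truthy aspect values in first-occurrence order (dict.fromkeys) and then builds each group with a separate filter pass over the whole input per key.
import Mathlib
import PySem

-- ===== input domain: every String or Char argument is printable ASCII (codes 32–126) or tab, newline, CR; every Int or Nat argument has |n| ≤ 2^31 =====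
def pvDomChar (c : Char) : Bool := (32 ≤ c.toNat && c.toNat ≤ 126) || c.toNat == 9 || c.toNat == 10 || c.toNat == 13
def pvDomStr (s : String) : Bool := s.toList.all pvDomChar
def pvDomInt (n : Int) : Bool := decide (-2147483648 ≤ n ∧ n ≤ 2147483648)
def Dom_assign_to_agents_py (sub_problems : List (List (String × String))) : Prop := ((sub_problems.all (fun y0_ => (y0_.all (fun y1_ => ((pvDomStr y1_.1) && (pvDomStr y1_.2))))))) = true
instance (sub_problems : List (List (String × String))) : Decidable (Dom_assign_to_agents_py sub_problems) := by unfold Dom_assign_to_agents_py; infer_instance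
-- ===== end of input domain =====

-- B replaces A's single-pass dict bucketing by a two-phase decomposition: first collect the
-- distinct truthy aspects in first-occurrence order (dict.fromkeys dedup), then build each
-- group by one filter pass over the whole input per key (objective: alternative, not faster).

-- shared helper: sub_problem.get("aspect") — first-match lookup on the association list
def pvAspect (sp : List (String × String)) : Option String :=
  (PySem.Dict.mk sp).get? "aspect"

-- ===== PORT A =====
def assign_to_agents_py (sub_problems : List (List (String × String))) : List (String × List (List (String × String))) :=
  (sub_problems.foldl
    (fun assignments sub_problem =>
      match pvAspect sub_problem with
      | none => assignments                    -- agent_type = None: falsy, skip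
      | some agent_type =>
        if agent_type = "" then assignments    -- empty string: falsy, skip
        else
          let assignments :=
            if assignments.contains agent_type then assignments
            else assignments.insert agent_type []
          assignments.modify agent_type [] (fun v => v ++ [sub_problem]))
    PySem.Dict.empty).items

-- ===== PORT B =====
-- 'sp.get("aspect") for sp in sub_problems if sp.get("aspect")' — the truthy aspects, in order
def pvTruthyAspect (sp : List (String × String)) : Option String :=
  match pvAspect sp with
  | none => none
  | some a => if a = "" then none else some a

def assign_to_agents_py_alt (sub_problems : List (List (String × String))) : List (String × List (List (String × String))) :=
  let keys := PySem.List.dedup (sub_problems.filterMap pvTruthyAspect)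
  keys.map (fun k => (k, sub_problems.filter (fun sp => pvAspect sp == some k)))

-- ===== PRECONDITION & SPEC =====
def Spec_assign_to_agents_py (sub_problems : List (List (String × String))) (out : List (String × List (List (String × String)))) : Prop := out = assign_to_agents_py_alt sub_problems
instance (sub_problems : List (List (String × String))) (out : List (String × List (List (String × String)))) : Decidable (Spec_assign_to_agents_py sub_problems out) := by unfold Spec_assign_to_agents_py; infer_instance

-- ===== CLAIM (what is proved, stated in full; the proofs are below) =====
def Claim_equal_assign_to_agents_py : Prop := ∀ (sub_problems : List (List (String × String))), Dom_assign_to_agents_py sub_problems → Spec_assign_to_agents_py sub_problems (assign_to_agents_py sub_problems)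

-- ===== LEMMAS AND PROOFS =====

-- A's loop body, rewritten: the conditional "insert [] then append" is one Dict.modify
theorem stepA_eq (d : PySem.Dict String (List (List (String × String)))) (sp : List (String × String)) :
    (match pvAspect sp with
      | none => d
      | some a =>
        if a = "" then d
        else
          let d' := if d.contains a then d else d.insert a []
          d'.modify a [] (fun v => v ++ [sp])) =
    (match pvTruthyAspect sp with
      | none => d
      | some a => d.modify a [] (fun v => v ++ [sp])) := by
  unfold pvTruthyAspect
  cases h : pvAspect sp with
  | none => rfl
  | some a =>
    by_cases ha : a = ""
    · simp [ha]
    · simp only [ha, if_false]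
      by_cases hc : d.contains a
      · simp [hc]
      · simp only [Bool.not_eq_true] at hc
        simp only [hc, Bool.false_eq_true, if_false, PySem.Dict.modify,
          PySem.Dict.getD_insert_self, PySem.Dict.insert_insert_self,
          PySem.Dict.getD_of_not_contains d _ hc]

-- skipping the non-truthy elements: A's guarded fold is a pure modify-fold over the (aspect, sp) pairs
theorem foldl_guard_eq (l : List (List (String × String))) (d : PySem.Dict String (List (List (String × String)))) :
    l.foldl (fun d sp =>
        match pvTruthyAspect sp with
        | none => d
        | some a => d.modify a [] (fun v => v ++ [sp])) d =
    (l.filterMap (fun sp => (pvTruthyAspect sp).map (fun a => (a, sp)))).foldl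
        (fun d p => d.modify p.1 [] (fun v => v ++ [p.2])) d := by
  induction l generalizing d with
  | nil => rfl
  | cons sp t ih =>
    simp only [List.foldl_cons, List.filterMap_cons]
    cases h : pvTruthyAspect sp <;> simp [ih]

-- the first components of the pair list are exactly B's truthy-aspect list
theorem map_fst_pairs (l : List (List (String × String))) :
    (l.filterMap (fun sp => (pvTruthyAspect sp).map (fun a => (a, sp)))).map Prod.fst =
    l.filterMap pvTruthyAspect := by
  induction l with
  | nil => rfl
  | cons sp t ih => cases h : pvTruthyAspect sp <;> simp [h, ih]

-- for a truthy key k, filtering the pair list by first component is B's filter over the input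
theorem filter_pairs (l : List (List (String × String))) (k : String) (hk : k ≠ "") :
    ((l.filterMap (fun sp => (pvTruthyAspect sp).map (fun a => (a, sp)))).filter
        (fun p => p.1 == k)).map (fun p => p.2) =
    l.filter (fun sp => pvAspect sp == some k) := by
  induction l with
  | nil => rfl
  | cons sp t ih =>
    simp only [List.filterMap_cons, List.filter_cons]
    cases h : pvTruthyAspect sp with
    | none =>
      have : (pvAspect sp == some k) = false := by
        unfold pvTruthyAspect at h
        cases ha : pvAspect sp with
        | none => simp
        | some a =>
          simp only [ha] at h
          by_cases hae : a = ""
          · simp [hae, Ne.symm hk]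
          · simp [hae] at h
      simp [this, ih]
    | some a =>
      have ha : pvAspect sp = some a ∧ a ≠ "" := by
        unfold pvTruthyAspect at h
        cases ha : pvAspect sp with
        | none => simp [ha] at h
        | some b =>
          simp only [ha] at h
          by_cases hbe : b = ""
          · simp [hbe] at h
          · simp only [hbe, if_false] at h
            exact ⟨by rw [Option.some_inj] at h; rw [h], by rw [Option.some_inj] at h; rw [← h]; exact hbe⟩
      by_cases hak : a = k
      · subst hak
        simp [List.map_cons, ha.1, ih]
      · have : (pvAspect sp == some k) = false := by simp [ha.1, hak]
        simp [this, hak, ih]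

-- every key of B's key list is truthy (non-empty)
theorem keys_ne_empty (l : List (List (String × String))) (k : String)
    (hk : k ∈ PySem.List.dedup (l.filterMap pvTruthyAspect)) : k ≠ "" := by
  rw [PySem.List.dedup_eq_ofList, PySem.Set.mem_ofList] at hk
  obtain ⟨sp, _, hsp⟩ := List.mem_filterMap.mp hk
  unfold pvTruthyAspect at hsp
  cases ha : pvAspect sp with
  | none => simp [ha] at hsp
  | some a =>
    simp only [ha] at hsp
    by_cases hae : a = ""
    · simp [hae] at hsp
    · simp only [hae, if_false, Option.some_inj] at hsp
      rw [← hsp]; exact hae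

-- ===== VERDICT (by name: the statement is the Claim_ definition above) =====
theorem assign_to_agents_py_spec : Claim_equal_assign_to_agents_py := by
  intro sub_problems _
  unfold Spec_assign_to_agents_py assign_to_agents_py assign_to_agents_py_alt
  have hbody : ∀ (d : PySem.Dict String (List (List (String × String)))),
      sub_problems.foldl
        (fun assignments sub_problem =>
          match pvAspect sub_problem with
          | none => assignments
          | some agent_type =>
            if agent_type = "" then assignments
            else
              let assignments :=
                if assignments.contains agent_type then assignments
                else assignments.insert agent_type []
              assignments.modify agent_type [] (fun v => v ++ [sub_problem])) d =
      (sub_problems.filterMap (fun sp => (pvTruthyAspect sp).map (fun a => (a, sp)))).foldl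
        (fun d p => d.modify p.1 [] (fun v => v ++ [p.2])) d := by
    intro d
    rw [← foldl_guard_eq]
    exact PySem.List.foldl_congr_mem _ _ _ _ (fun d' sp _ => stepA_eq d' sp)
  rw [hbody]
  set l := sub_problems.filterMap (fun sp => (pvTruthyAspect sp).map (fun a => (a, sp))) with hl
  set D := l.foldl (fun d p => d.modify p.1 [] (fun v => v ++ [p.2])) PySem.Dict.empty with hD
  have hkeys : D.keys = PySem.List.dedup (sub_problems.filterMap pvTruthyAspect) := by
    rw [hD, PySem.Dict.keys_foldl_modify_key l Prod.fst [] (fun _ p v => v ++ [p.2])]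
    rw [PySem.Dict.keys_empty, PySem.Set.update_nil_left, ← PySem.List.dedup_eq_ofList]
    rw [show (List.map Prod.fst l) = (l.map Prod.fst) from rfl, hl, map_fst_pairs]
  have hnodup : D.keys.Nodup := by
    rw [hD]
    exact PySem.Dict.nodup_keys_foldl_modify_key l Prod.fst [] (fun _ p v => v ++ [p.2])
      PySem.Dict.empty (by rw [PySem.Dict.keys_empty]; exact List.nodup_nil)
  rw [PySem.Dict.items_eq_map_keys D hnodup [], hkeys]
  apply List.map_congr_left
  intro k hk
  have hgd : D.getD k [] = sub_problems.filter (fun sp => pvAspect sp == some k) := by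
    rw [hD, PySem.Dict.getD_foldl_modify_append l PySem.Dict.empty k,
      PySem.Dict.getD_empty, List.nil_append, hl, filter_pairs _ _ (keys_ne_empty _ _ hk)]
  rw [hgd]
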